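-- pv_equiv track=rewrite | github.com/ELAI-Dev-Works/ELAI-DevKit | apps/dev_patcher/core/commands/project/execute/setup_args/run.py | parse
-- ===== SOURCE A (Python) =====
-- def parse(args_list: list) -> str:
--     try:
--         if '-run' not in args_list:
--             return None
--
--         arg_index = args_list.index('-run')
--         start_index = arg_index + 1
--
--         if start_index >= len(args_list):
--             return None
--
--         first_token = args_list[start_index]
--
--         # Case 1: Single token <main.py>
--         if first_token.startswith('<') and first_token.endswith('>'):
--             args_list.pop(start_index)
--             args_list.pop(arg_index)
--             return first_token[1:-1]
--
--         # Case 2: Multi-token <npm run dev>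
--         if first_token.startswith('<'):
--             parts = []
--             end_index = -1
--             # Gather tokens until one ends with '>'
--             for i in range(start_index, len(args_list)):
--                 token = args_list[i]
--                 parts.append(token)
--                 if token.endswith('>'):
--                     end_index = i
--                     break
--
--             if end_index != -1:
--                 # Remove used tokens (reverse order to keep indices valid)
--                 for _ in range(start_index, end_index + 1):
--                     args_list.pop(start_index)
--                 args_list.pop(arg_index) # Remove -run argument itself
--
--                 full_str = " ".join(parts)
--                 return full_str[1:-1] # Remove < and >
--
--     except (ValueError, IndexError):
--         pass
--     return None
-- ===== SOURCE B (Python) =====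
-- def parse(args_list: list) -> str:
--     # One-pass state machine over enumerate(args_list): SEEK '-run', then check the
--     # opener, then GATHER until a token ends with '>'; mutation is one slice assignment.
--     SEEK, OPEN, GATHER = 0, 1, 2
--     state = SEEK
--     run_pos = -1
--     parts = []
--     for pos, token in enumerate(args_list):
--         if state == SEEK:
--             if token == '-run':
--                 state = OPEN
--                 run_pos = pos
--         elif state == OPEN:
--             if not token.startswith('<'):
--                 return None
--             parts.append(token)
--             if token.endswith('>'):
--                 args_list[:] = args_list[:run_pos] + args_list[pos + 1:]
--                 return ' '.join(parts)[1:-1]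
--             state = GATHER
--         else:
--             parts.append(token)
--             if token.endswith('>'):
--                 args_list[:] = args_list[:run_pos] + args_list[pos + 1:]
--                 return ' '.join(parts)[1:-1]
--     return None
-- ===== Notes on version B (the rewrite author's own statement) =====
-- stated objective: alternative
-- what changed: B is a single structural pass: a three-state machine (SEEK '-run' / OPEN check the '<' token / GATHER until a token ends with '>') over enumerate(args_list), with no membership test, no .index, no single-token special case, no index-range gather loop and no repeated pops — the mutation is one slice assignment from the recorded positions.
import Mathlib
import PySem

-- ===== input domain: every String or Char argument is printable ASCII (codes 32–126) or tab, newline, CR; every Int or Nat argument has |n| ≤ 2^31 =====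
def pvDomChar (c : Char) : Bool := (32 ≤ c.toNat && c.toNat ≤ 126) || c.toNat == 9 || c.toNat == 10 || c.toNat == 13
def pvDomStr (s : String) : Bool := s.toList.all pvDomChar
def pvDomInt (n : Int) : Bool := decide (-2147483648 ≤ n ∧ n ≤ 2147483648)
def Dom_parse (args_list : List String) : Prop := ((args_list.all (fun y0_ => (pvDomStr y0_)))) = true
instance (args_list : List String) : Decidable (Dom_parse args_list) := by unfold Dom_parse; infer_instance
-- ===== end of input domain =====

-- B replaces A's index-based locate-then-scan (membership test, .index, a single-token special
-- case, an indexed gather loop, repeated pops) with a single structural pass: a three-state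
-- machine over the tokens. Equivalence is about the RETURN value; both Pythons perform the
-- identical list mutation (checked in Python), the ports are pure.

-- ===== PORT A =====
-- A's gather loop 'for i in range(start_index, len(args_list)): …', carrying (parts, end_index);
-- pyGetD's default "" is never used: every index of the range is in range.
def parseGather (args_list : List String) : List Int → List String → List String × Int
  | [], parts => (parts, -1)
  | i :: rest, parts =>
    let token := PySem.List.pyGetD args_list i ""
    if PySem.Str.endswith token ">" then (parts ++ [token], i)
    else parseGather args_list rest (parts ++ [token])

def parse (args_list : List String) : Option String :=
  if ¬ args_list.contains "-run" then none
  else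
    match PySem.List.index? args_list "-run" with
    | none => none  -- unreachable: '-run' ∈ args_list
    | some arg_index =>
      let start_index : Int := (arg_index : Int) + 1
      if (args_list.length : Int) ≤ start_index then none
      else
        match PySem.List.pyGet? args_list start_index with
        | none => none  -- unreachable: start_index is in range
        | some first_token =>
          -- Case 1: single token <main.py>
          if PySem.Str.startswith first_token "<" && PySem.Str.endswith first_token ">" then
            some (PySem.Str.slice first_token (some 1) (some (-1)))
          -- Case 2: multi-token <npm run dev>
          else if PySem.Str.startswith first_token "<" then
            let r := parseGather args_list (PySem.List.pyRange start_index (args_list.length : Int) 1) []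
            if r.2 ≠ -1 then
              some (PySem.Str.slice (PySem.Str.join " " r.1) (some 1) (some (-1)))
            else none
          else none

-- ===== PORT B =====
-- Source B's state machine: one recursive function per state (SEEK / OPEN / GATHER), structural
-- recursion over the token list; run_pos/pos feed only the (unmodeled) mutation and are dropped.
def parseAltGather : List String → List String → Option String
  | [], _ => none
  | token :: rest, parts =>
    let parts' := parts ++ [token]
    if PySem.Str.endswith token ">" then
      some (PySem.Str.slice (PySem.Str.join " " parts') (some 1) (some (-1)))
    else parseAltGather rest parts'

def parseAltOpen : List String → Option String
  | [] => none
  | token :: rest =>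
    if ¬ PySem.Str.startswith token "<" then none
    else if PySem.Str.endswith token ">" then
      some (PySem.Str.slice (PySem.Str.join " " [token]) (some 1) (some (-1)))
    else parseAltGather rest [token]

def parseAltSeek : List String → Option String
  | [] => none
  | token :: rest => if token == "-run" then parseAltOpen rest else parseAltSeek rest

def parse_alt (args_list : List String) : Option String := parseAltSeek args_list

-- ===== PRECONDITION & SPEC =====
def Spec_parse (args_list : List String) (out : Option String) : Prop := out = parse_alt args_list
instance (args_list : List String) (out : Option String) : Decidable (Spec_parse args_list out) := by unfold Spec_parse; infer_instance

-- ===== CLAIM (what is proved, stated in full; the proofs are below) =====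
def Claim_equal_parse : Prop := ∀ (args_list : List String), Dom_parse args_list → Spec_parse args_list (parse args_list)

-- ===== LEMMAS AND PROOFS =====

-- B's SEEK state is A's index?: it hands the suffix after the first '-run' to OPEN.
theorem seek_eq_index (xs : List String) :
    parseAltSeek xs =
      (match PySem.List.index? xs "-run" with
       | none => none
       | some k => parseAltOpen (xs.drop (k + 1))) := by
  induction xs with
  | nil => simp [parseAltSeek, PySem.List.index?_eq_idxOf?, List.idxOf?]
  | cons x rest ih =>
    by_cases hx : x = "-run"
    · subst hx
      rw [PySem.List.index?_cons_self]
      simp [parseAltSeek]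
    · rw [PySem.List.index?_cons_of_ne rest hx]
      simp only [parseAltSeek, beq_iff_eq, hx, if_false]
      rw [ih]
      cases h : PySem.List.index? rest "-run" with
      | none => simp
      | some k => simp

-- B's GATHER state on the suffix xs.drop n is A's indexed gather over range(n, len(xs))
-- followed by A's post-processing of (parts, end_index).
theorem gather_eq (xs : List String) :
    ∀ (l : List String) (n : Nat) (parts : List String), xs.drop n = l →
    parseAltGather l parts =
      (if (parseGather xs (PySem.List.pyRange (n : Int) (xs.length : Int) 1) parts).2 ≠ -1 then
        some (PySem.Str.slice
          (PySem.Str.join " " (parseGather xs (PySem.List.pyRange (n : Int) (xs.length : Int) 1) parts).1)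
          (some 1) (some (-1)))
      else none) := by
  intro l
  induction l with
  | nil =>
    intro n parts hd
    have hlen : xs.length ≤ n := by
      have := List.drop_eq_nil_iff.mp hd; omega
    rw [PySem.List.pyRange_one_eq_nil (by exact_mod_cast hlen)]
    simp [parseAltGather, parseGather]
  | cons t l' ih =>
    intro n parts hd
    have hn : n < xs.length := by
      by_contra hc
      rw [List.drop_eq_nil_iff.mpr (by omega)] at hd
      simp at hd
    have hcons : xs.drop n = xs[n] :: xs.drop (n + 1) := List.drop_eq_getElem_cons hn
    rw [hd] at hcons
    obtain ⟨ht, hl'⟩ : t = xs[n] ∧ l' = xs.drop (n + 1) := by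
      injection hcons with h1 h2; exact ⟨h1, h2⟩
    have hInt : (n : Int) < (xs.length : Int) := by exact_mod_cast hn
    rw [PySem.List.pyRange_one_cons hInt]
    have hget : PySem.List.pyGetD xs (n : Int) "" = xs[n] := by
      rw [PySem.List.pyGetD_natCast]; exact List.getD_eq_getElem _ _ hn
    simp only [parseAltGather, parseGather, hget, ← ht]
    by_cases he : PySem.Str.endswith t ">" = true
    · have hne : (n : Int) ≠ -1 := by omega
      have he' : PySem.Chars.endswith t.toList ['>'] = true := by simpa using he
      simp [he', hne]
    · have hcast : ((n : Int) + 1) = ((n + 1 : Nat) : Int) := by push_cast; ring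
      rw [if_neg he, if_neg he, hcast, ih (n + 1) (parts ++ [t]) hl'.symm]

-- join with " " of a single string is that string
theorem join_singleton_str (s : String) : PySem.Str.join " " [s] = s := by
  have : (PySem.Str.join " " [s]).toList = s.toList := by
    simp [PySem.Chars.join, List.intercalate]
  exact String.toList_injective this

-- ===== VERDICT (by name: the statement is the Claim_ definition above) =====
theorem parse_spec : Claim_equal_parse := by
  intro args_list _
  unfold Spec_parse parse parse_alt
  rw [seek_eq_index]
  cases hidx : PySem.List.index? args_list "-run" with
  | none =>
    have hnm : "-run" ∉ args_list := (PySem.List.index?_eq_none_iff _ _).mp hidx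
    simp [hnm]
  | some arg_index =>
    have hmem : "-run" ∈ args_list := by
      by_contra hc
      rw [(PySem.List.index?_eq_none_iff _ _).mpr hc] at hidx
      simp at hidx
    simp only [List.contains_iff_mem, hmem, not_true_eq_false, if_false]
    by_cases hlen : (args_list.length : Int) ≤ (arg_index : Int) + 1
    · have hdrop : args_list.drop (arg_index + 1) = [] :=
        List.drop_eq_nil_iff.mpr (by exact_mod_cast hlen)
      simp [hlen, hdrop, parseAltOpen]
    · have hnat : arg_index + 1 < args_list.length := by
        have := not_le.mp hlen; exact_mod_cast this
      have h2 : ((arg_index : Int) + 1) < (args_list.length : Int) := by exact_mod_cast hnat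
      have hget : PySem.List.pyGet? args_list ((arg_index : Int) + 1) =
          some args_list[arg_index + 1] := by
        have h0 : (0 : Int) ≤ (arg_index : Int) + 1 := by positivity
        simp [PySem.List.pyGet?, PySem.List.pyIdx?, h0, h2, hnat]
      have hdrop : args_list.drop (arg_index + 1) =
          args_list[arg_index + 1] :: args_list.drop (arg_index + 2) := by
        have h := List.drop_eq_getElem_cons hnat
        simp only [show arg_index + 1 + 1 = arg_index + 2 from rfl] at h
        exact h
      simp only [hlen, if_false, hget, hdrop]
      by_cases hs : PySem.Chars.startswith args_list[arg_index + 1].toList ['<'] = true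
      · by_cases he : PySem.Chars.endswith args_list[arg_index + 1].toList ['>'] = true
        · simp [parseAltOpen, hs, he, join_singleton_str]
        · -- multi-token: one unfolding of B's GATHER on the suffix, then gather_eq
          have hB : parseAltOpen (args_list[arg_index + 1] :: args_list.drop (arg_index + 2)) =
              parseAltGather (args_list.drop (arg_index + 1)) [] := by
            rw [hdrop]
            simp [parseAltOpen, parseAltGather, hs, he]
          rw [hB, gather_eq args_list (args_list.drop (arg_index + 1)) (arg_index + 1) [] rfl]
          have hc : ((arg_index : Int) + 1) = ((arg_index + 1 : Nat) : Int) := by push_cast; ring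
          rw [hc]
          simp [hs, he]
      · simp [parseAltOpen, hs]
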